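-- pv_equiv track=rewrite | github.com/chriswarren85/NetPi | checks/validation.py | get_validation_profile
-- ===== SOURCE A (Python) =====
-- VALIDATION_RULES = {
--     "network-device": ["ping", "http", "ssh"],
--     "crestron": ["ping", "http", "https"],
--     "crestron_uc": ["ping", "http", "https"],
--     "crestron_control": ["ping", "http", "https"],
--     "biamp": ["ping", "http", "https"],
--     "nvx": ["ping", "http", "https"],
--     "av_general": ["ping"],
--     "qsys": ["ping", "http", "port:1710"],
--     "dante": ["ping", "port:8700", "port:8800"],
--     "novastar": ["ping", "port:5200"],
--     "lighting": ["ping", "artnet", "sacn"],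
--     "barco_ctrl": ["ping", "http", "https"],
--     "sacn": ["ping", "port:5568"],
--     "artnet": ["ping", "port:6454"],
--     "grandma": ["ping", "port:80", "port:443"],
--     "generic": ["ping"],
-- }
--
-- TYPE_ALIASES = {
--     "crestron": "crestron",
--     "crestron_uc": "crestron_uc",
--     "crestron uc": "crestron_uc",
--     "crestron_control": "crestron_control",
--     "crestron control": "crestron_control",
--     "biamp": "biamp",
--     "tesira": "biamp",
--     "nvx": "nvx",
--     "av_general": "av_general",
--     "av general": "av_general",
--     "qsys": "qsys",
--     "dante": "dante",
--     "novastar": "novastar",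
--     "barco_ctrl": "barco_ctrl",
--     "barco ctrl": "barco_ctrl",
--     "sacn": "sacn",
--     "artnet": "artnet",
--     "grandma": "grandma",
--     "lighting": "lighting",
--     "network-device": "network-device",
--     "network device": "network-device",
--     "generic": "generic",
-- }
--
-- CHECK_EXPANDERS = {
--     "http": ["port:80"],
--     "https": ["port:443", "ssl"],
--     "ssh": ["port:22"],
--     "web": ["port:80", "port:443"],
--     "ssl": ["ssl"],
--     "artnet": ["port:6454"],
--     "sacn": ["port:5568"],
-- }
--
-- def normalize_device_type(device_type):
--     value = (device_type or "").strip().lower()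
--     return TYPE_ALIASES.get(value, value or "generic")
--
-- def get_validation_profile(device_type):
--     normalized = normalize_device_type(device_type)
--     checks = VALIDATION_RULES.get(normalized)
--
--     if not checks:
--         checks = VALIDATION_RULES["generic"]
--
--     expanded = []
--     for check in checks:
--         expanded.extend(expand_check(check))
--
--     # Deduplicate while preserving order
--     seen = set()
--     ordered = []
--     for item in expanded:
--         if item not in seen:
--             seen.add(item)
--             ordered.append(item)
--
--     return normalized, ordered
--
-- def expand_check(check):
--     check = (check or "").strip().lower()
--     return CHECK_EXPANDERS.get(check, [check])
-- ===== SOURCE B (Python) =====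
-- TYPE_ALIASES = {
--     "crestron": "crestron",
--     "crestron_uc": "crestron_uc",
--     "crestron uc": "crestron_uc",
--     "crestron_control": "crestron_control",
--     "crestron control": "crestron_control",
--     "biamp": "biamp",
--     "tesira": "biamp",
--     "nvx": "nvx",
--     "av_general": "av_general",
--     "av general": "av_general",
--     "qsys": "qsys",
--     "dante": "dante",
--     "novastar": "novastar",
--     "barco_ctrl": "barco_ctrl",
--     "barco ctrl": "barco_ctrl",
--     "sacn": "sacn",
--     "artnet": "artnet",
--     "grandma": "grandma",
--     "lighting": "lighting",
--     "network-device": "network-device",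
--     "network device": "network-device",
--     "generic": "generic",
-- }
--
-- # Fully expanded, order-preserving deduplicated profiles, precomputed once.
-- # Unknown device types fall back to the generic profile ["ping"].
-- EXPANDED_PROFILES = {
--     "network-device": ["ping", "port:80", "port:22"],
--     "crestron": ["ping", "port:80", "port:443", "ssl"],
--     "crestron_uc": ["ping", "port:80", "port:443", "ssl"],
--     "crestron_control": ["ping", "port:80", "port:443", "ssl"],
--     "biamp": ["ping", "port:80", "port:443", "ssl"],
--     "nvx": ["ping", "port:80", "port:443", "ssl"],
--     "av_general": ["ping"],
--     "qsys": ["ping", "port:80", "port:1710"],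
--     "dante": ["ping", "port:8700", "port:8800"],
--     "novastar": ["ping", "port:5200"],
--     "lighting": ["ping", "port:6454", "port:5568"],
--     "barco_ctrl": ["ping", "port:80", "port:443", "ssl"],
--     "sacn": ["ping", "port:5568"],
--     "artnet": ["ping", "port:6454"],
--     "grandma": ["ping", "port:80", "port:443"],
--     "generic": ["ping"],
-- }
--
-- def normalize_device_type(device_type):
--     value = (device_type or "").strip().lower()
--     return TYPE_ALIASES.get(value, value or "generic")
--
-- def get_validation_profile(device_type):
--     normalized = normalize_device_type(device_type)
--     return normalized, list(EXPANDED_PROFILES.get(normalized, ["ping"]))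
-- ===== Notes on version B (the rewrite author's own statement) =====
-- stated objective: simpler
-- what changed: Replaces the per-call expand-then-dedup loops with a precomputed table of fully expanded, deduplicated profiles, so a call is just normalization plus one dictionary lookup (unknown types fall back to the generic profile).
import Mathlib
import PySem

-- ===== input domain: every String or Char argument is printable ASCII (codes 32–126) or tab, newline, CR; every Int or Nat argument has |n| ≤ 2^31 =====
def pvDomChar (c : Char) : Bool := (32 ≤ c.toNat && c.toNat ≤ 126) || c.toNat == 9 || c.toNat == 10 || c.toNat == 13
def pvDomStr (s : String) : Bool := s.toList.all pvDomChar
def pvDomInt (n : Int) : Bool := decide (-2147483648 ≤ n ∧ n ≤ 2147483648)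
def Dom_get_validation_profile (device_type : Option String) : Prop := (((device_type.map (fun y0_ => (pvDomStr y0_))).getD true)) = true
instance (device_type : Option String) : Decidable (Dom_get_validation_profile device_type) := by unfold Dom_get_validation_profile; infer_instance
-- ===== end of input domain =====

-- B replaces A's per-call expand-then-dedup loops with a precomputed table of fully
-- expanded deduplicated profiles: one lookup per call (objective: simpler).

-- ===== PORT A =====
def validationRules : PySem.Dict String (List String) := PySem.Dict.ofList [
  ("network-device", ["ping", "http", "ssh"]),
  ("crestron", ["ping", "http", "https"]),
  ("crestron_uc", ["ping", "http", "https"]),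
  ("crestron_control", ["ping", "http", "https"]),
  ("biamp", ["ping", "http", "https"]),
  ("nvx", ["ping", "http", "https"]),
  ("av_general", ["ping"]),
  ("qsys", ["ping", "http", "port:1710"]),
  ("dante", ["ping", "port:8700", "port:8800"]),
  ("novastar", ["ping", "port:5200"]),
  ("lighting", ["ping", "artnet", "sacn"]),
  ("barco_ctrl", ["ping", "http", "https"]),
  ("sacn", ["ping", "port:5568"]),
  ("artnet", ["ping", "port:6454"]),
  ("grandma", ["ping", "port:80", "port:443"]),
  ("generic", ["ping"])]

def typeAliases : PySem.Dict String String := PySem.Dict.ofList [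
  ("crestron", "crestron"), ("crestron_uc", "crestron_uc"), ("crestron uc", "crestron_uc"),
  ("crestron_control", "crestron_control"), ("crestron control", "crestron_control"),
  ("biamp", "biamp"), ("tesira", "biamp"), ("nvx", "nvx"),
  ("av_general", "av_general"), ("av general", "av_general"),
  ("qsys", "qsys"), ("dante", "dante"), ("novastar", "novastar"),
  ("barco_ctrl", "barco_ctrl"), ("barco ctrl", "barco_ctrl"),
  ("sacn", "sacn"), ("artnet", "artnet"), ("grandma", "grandma"),
  ("lighting", "lighting"), ("network-device", "network-device"),
  ("network device", "network-device"), ("generic", "generic")]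

def checkExpanders : PySem.Dict String (List String) := PySem.Dict.ofList [
  ("http", ["port:80"]), ("https", ["port:443", "ssl"]), ("ssh", ["port:22"]),
  ("web", ["port:80", "port:443"]), ("ssl", ["ssl"]),
  ("artnet", ["port:6454"]), ("sacn", ["port:5568"])]

-- (device_type or "") : None → "", a falsy (empty) string is "" already
def normalizeDeviceType (device_type : Option String) : String :=
  let value := PySem.Str.lower (PySem.Str.strip (device_type.getD ""))
  PySem.Dict.getD typeAliases value (if value = "" then "generic" else value)

def expandCheck (check : String) : List String :=
  let c := PySem.Str.lower (PySem.Str.strip check)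
  PySem.Dict.getD checkExpanders c [c]

-- A's `if item not in seen` dedup body
def dedupStep (st : PySem.Set String × List String) (item : String) : PySem.Set String × List String :=
  if PySem.Set.contains st.1 item then st else (PySem.Set.add st.1 item, st.2 ++ [item])

-- VALIDATION_RULES["generic"] cannot raise (key present); ported as get? ... getD []
def get_validation_profile (device_type : Option String) : String × List String :=
  let normalized := normalizeDeviceType device_type
  let checks :=
    match PySem.Dict.get? validationRules normalized with
    | none => (PySem.Dict.get? validationRules "generic").getD []
    | some l => if l = [] then (PySem.Dict.get? validationRules "generic").getD [] else l
  let expanded := checks.foldl (fun e c => e ++ expandCheck c) ([] : List String)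
  let st := expanded.foldl dedupStep (PySem.Set.empty, ([] : List String))
  (normalized, st.2)

-- ===== PORT B =====
-- fully expanded, order-preserving deduplicated profiles, precomputed once
def expandedProfiles : PySem.Dict String (List String) := PySem.Dict.ofList [
  ("network-device", ["ping", "port:80", "port:22"]),
  ("crestron", ["ping", "port:80", "port:443", "ssl"]),
  ("crestron_uc", ["ping", "port:80", "port:443", "ssl"]),
  ("crestron_control", ["ping", "port:80", "port:443", "ssl"]),
  ("biamp", ["ping", "port:80", "port:443", "ssl"]),
  ("nvx", ["ping", "port:80", "port:443", "ssl"]),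
  ("av_general", ["ping"]),
  ("qsys", ["ping", "port:80", "port:1710"]),
  ("dante", ["ping", "port:8700", "port:8800"]),
  ("novastar", ["ping", "port:5200"]),
  ("lighting", ["ping", "port:6454", "port:5568"]),
  ("barco_ctrl", ["ping", "port:80", "port:443", "ssl"]),
  ("sacn", ["ping", "port:5568"]),
  ("artnet", ["ping", "port:6454"]),
  ("grandma", ["ping", "port:80", "port:443"]),
  ("generic", ["ping"])]

def get_validation_profile_alt (device_type : Option String) : String × List String :=
  let normalized := normalizeDeviceType device_type
  (normalized, PySem.Dict.getD expandedProfiles normalized ["ping"])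

-- ===== PRECONDITION & SPEC =====
def Spec_get_validation_profile (device_type : Option String) (out : String × List String) : Prop := out = get_validation_profile_alt device_type
instance (device_type : Option String) (out : String × List String) : Decidable (Spec_get_validation_profile device_type out) := by unfold Spec_get_validation_profile; infer_instance

-- ===== CLAIM (what is proved, stated in full; the proofs are below) =====
def Claim_equal_get_validation_profile : Prop := ∀ (device_type : Option String), Dom_get_validation_profile device_type → Spec_get_validation_profile device_type (get_validation_profile device_type)

-- ===== LEMMAS AND PROOFS =====
-- A's whole expand-then-dedup pipeline, for ANY normalized string, equals one table lookup
set_option maxHeartbeats 4000000 in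
theorem pipeline_eq_table (s : String) :
    (((match PySem.Dict.get? validationRules s with
        | none => (PySem.Dict.get? validationRules "generic").getD []
        | some l => if l = [] then (PySem.Dict.get? validationRules "generic").getD [] else l
       ).foldl (fun e c => e ++ expandCheck c) ([] : List String)
      ).foldl dedupStep (PySem.Set.empty, ([] : List String))).2
      = PySem.Dict.getD expandedProfiles s ["ping"] := by
  have hv : validationRules = PySem.Dict.mk [
      ("network-device", ["ping", "http", "ssh"]), ("crestron", ["ping", "http", "https"]),
      ("crestron_uc", ["ping", "http", "https"]), ("crestron_control", ["ping", "http", "https"]),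
      ("biamp", ["ping", "http", "https"]), ("nvx", ["ping", "http", "https"]),
      ("av_general", ["ping"]), ("qsys", ["ping", "http", "port:1710"]),
      ("dante", ["ping", "port:8700", "port:8800"]), ("novastar", ["ping", "port:5200"]),
      ("lighting", ["ping", "artnet", "sacn"]), ("barco_ctrl", ["ping", "http", "https"]),
      ("sacn", ["ping", "port:5568"]), ("artnet", ["ping", "port:6454"]),
      ("grandma", ["ping", "port:80", "port:443"]), ("generic", ["ping"])] := by decide
  have hp : expandedProfiles = PySem.Dict.mk [
      ("network-device", ["ping", "port:80", "port:22"]), ("crestron", ["ping", "port:80", "port:443", "ssl"]),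
      ("crestron_uc", ["ping", "port:80", "port:443", "ssl"]), ("crestron_control", ["ping", "port:80", "port:443", "ssl"]),
      ("biamp", ["ping", "port:80", "port:443", "ssl"]), ("nvx", ["ping", "port:80", "port:443", "ssl"]),
      ("av_general", ["ping"]), ("qsys", ["ping", "port:80", "port:1710"]),
      ("dante", ["ping", "port:8700", "port:8800"]), ("novastar", ["ping", "port:5200"]),
      ("lighting", ["ping", "port:6454", "port:5568"]), ("barco_ctrl", ["ping", "port:80", "port:443", "ssl"]),
      ("sacn", ["ping", "port:5568"]), ("artnet", ["ping", "port:6454"]),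
      ("grandma", ["ping", "port:80", "port:443"]), ("generic", ["ping"])] := by decide
  rw [hv, hp]
  simp only [PySem.Dict.getD_eq_get?_getD, PySem.Dict.get?_mk_cons]
  by_cases h0 : ("network-device" == s) = true
  · obtain rfl := beq_iff_eq.mp h0
    decide
  simp only [Bool.not_eq_true] at h0
  simp only [h0, Bool.false_eq_true, if_false]
  by_cases h1 : ("crestron" == s) = true
  · obtain rfl := beq_iff_eq.mp h1
    decide
  simp only [Bool.not_eq_true] at h1
  simp only [h1, Bool.false_eq_true, if_false]
  by_cases h2 : ("crestron_uc" == s) = true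
  · obtain rfl := beq_iff_eq.mp h2
    decide
  simp only [Bool.not_eq_true] at h2
  simp only [h2, Bool.false_eq_true, if_false]
  by_cases h3 : ("crestron_control" == s) = true
  · obtain rfl := beq_iff_eq.mp h3
    decide
  simp only [Bool.not_eq_true] at h3
  simp only [h3, Bool.false_eq_true, if_false]
  by_cases h4 : ("biamp" == s) = true
  · obtain rfl := beq_iff_eq.mp h4
    decide
  simp only [Bool.not_eq_true] at h4
  simp only [h4, Bool.false_eq_true, if_false]
  by_cases h5 : ("nvx" == s) = true
  · obtain rfl := beq_iff_eq.mp h5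
    decide
  simp only [Bool.not_eq_true] at h5
  simp only [h5, Bool.false_eq_true, if_false]
  by_cases h6 : ("av_general" == s) = true
  · obtain rfl := beq_iff_eq.mp h6
    decide
  simp only [Bool.not_eq_true] at h6
  simp only [h6, Bool.false_eq_true, if_false]
  by_cases h7 : ("qsys" == s) = true
  · obtain rfl := beq_iff_eq.mp h7
    decide
  simp only [Bool.not_eq_true] at h7
  simp only [h7, Bool.false_eq_true, if_false]
  by_cases h8 : ("dante" == s) = true
  · obtain rfl := beq_iff_eq.mp h8
    decide
  simp only [Bool.not_eq_true] at h8
  simp only [h8, Bool.false_eq_true, if_false]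
  by_cases h9 : ("novastar" == s) = true
  · obtain rfl := beq_iff_eq.mp h9
    decide
  simp only [Bool.not_eq_true] at h9
  simp only [h9, Bool.false_eq_true, if_false]
  by_cases h10 : ("lighting" == s) = true
  · obtain rfl := beq_iff_eq.mp h10
    decide
  simp only [Bool.not_eq_true] at h10
  simp only [h10, Bool.false_eq_true, if_false]
  by_cases h11 : ("barco_ctrl" == s) = true
  · obtain rfl := beq_iff_eq.mp h11
    decide
  simp only [Bool.not_eq_true] at h11
  simp only [h11, Bool.false_eq_true, if_false]
  by_cases h12 : ("sacn" == s) = true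
  · obtain rfl := beq_iff_eq.mp h12
    decide
  simp only [Bool.not_eq_true] at h12
  simp only [h12, Bool.false_eq_true, if_false]
  by_cases h13 : ("artnet" == s) = true
  · obtain rfl := beq_iff_eq.mp h13
    decide
  simp only [Bool.not_eq_true] at h13
  simp only [h13, Bool.false_eq_true, if_false]
  by_cases h14 : ("grandma" == s) = true
  · obtain rfl := beq_iff_eq.mp h14
    decide
  simp only [Bool.not_eq_true] at h14
  simp only [h14, Bool.false_eq_true, if_false]
  by_cases h15 : ("generic" == s) = true
  · obtain rfl := beq_iff_eq.mp h15
    decide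
  simp only [Bool.not_eq_true] at h15
  simp only [h15, Bool.false_eq_true, if_false]
  rfl

-- ===== VERDICT (by name: the statement is the Claim_ definition above) =====
theorem get_validation_profile_spec : Claim_equal_get_validation_profile := by
  intro device_type _
  unfold Spec_get_validation_profile get_validation_profile get_validation_profile_alt
  simp only []
  rw [pipeline_eq_table]
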